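-- pv_equiv track=rewrite | github.com/njcuk9999/apero-utils | general/local_get/local_apero_get.py | clean_object
-- ===== SOURCE A (Python) =====
-- import string
--
-- BAD_OBJ_CHARS = [' '] + list(string.punctuation.replace('_', ''))
--
-- def clean_object(rawobjname: str) -> str:
--     """
--     Clean a 'rawobjname' to allow it to be consistent
--
--     :param rawobjname: str, the raw object name to clean
--
--     :return: str, the cleaned object name
--     """
--     # if raw object name contains null text - return Null string
--     if str(rawobjname).lower() in ['null', 'none', '']:
--         return 'Null'
--     # strip spaces off raw object
--     objectname = rawobjname.strip()
--     # replace + and - with "p" and "m"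
--     objectname = objectname.replace('+', 'p')
--     objectname = objectname.replace('-', 'm')
--     # now remove bad characters
--     for bad_char in BAD_OBJ_CHARS:
--         objectname = objectname.replace(bad_char, '_')
--     objectname = objectname.upper()
--     # deal with multiple underscores in a row
--     while '__' in objectname:
--         objectname = objectname.replace('__', '_')
--     # strip leading / trailing '_'
--     objectname = objectname.strip('_')
--     # return cleaned object name
--     return objectname
-- ===== SOURCE B (Python) =====
-- import string
--
-- def clean_object(rawobjname: str) -> str:
--     """Single-pass clean: map chars and collapse/skip underscores in one traversal."""
--     # if raw object name contains null text - return Null string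
--     if str(rawobjname).lower() in ['null', 'none', '']:
--         return 'Null'
--     out = []
--     for ch in rawobjname.strip():
--         if ch == '+':
--             ch = 'p'
--         elif ch == '-':
--             ch = 'm'
--         elif ch == ' ' or (ch in string.punctuation and ch != '_'):
--             ch = '_'
--         # never emit a leading underscore or two underscores in a row
--         if ch == '_' and (not out or out[-1] == '_'):
--             continue
--         out.append(ch)
--     # at most one trailing underscore can remain; drop it
--     if out and out[-1] == '_':
--         out.pop()
--     return ''.join(out).upper()
-- ===== Notes on version B (the rewrite author's own statement) =====
-- stated objective: simpler
-- what changed: Replaces A's pipeline of ~35 whole-string replace passes plus a while-loop that repeatedly collapses doubled underscores and a final strip of underscores by one single pass over the characters that maps each character and skips leading/duplicate underscores as it goes, popping at most one trailing underscore at the end.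
import Mathlib
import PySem

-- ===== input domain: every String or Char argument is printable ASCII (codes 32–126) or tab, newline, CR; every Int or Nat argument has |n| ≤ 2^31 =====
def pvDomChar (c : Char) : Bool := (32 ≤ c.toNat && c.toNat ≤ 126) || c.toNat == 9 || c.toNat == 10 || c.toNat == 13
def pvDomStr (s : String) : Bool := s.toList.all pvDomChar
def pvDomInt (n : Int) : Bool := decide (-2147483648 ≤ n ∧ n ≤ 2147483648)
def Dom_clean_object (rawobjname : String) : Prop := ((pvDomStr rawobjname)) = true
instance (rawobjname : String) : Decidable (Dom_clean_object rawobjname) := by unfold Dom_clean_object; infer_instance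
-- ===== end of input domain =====

-- B replaces A's many whole-string replace passes, '__'-collapse while-loop and strip('_') by one
-- single pass over the characters that skips leading/duplicate underscores as it goes (same values).

-- ===== PORT A =====
-- (rep1 and the lemmas up to collapse_step_lt exist only to justify termination of collapseUnder,
--  the port of A's `while '__' in objectname` loop, which is cited by name in `decreasing_by`.)
def rep1 : List Char → List Char
  | [] => []
  | [c] => [c]
  | a :: b :: t => if a = '_' ∧ b = '_' then '_' :: rep1 t else a :: rep1 (b :: t)

theorem go_nil (old new : List Char) : ∀ (fuel : Nat) (acc : List Char),
    PySem.Chars.replace.go old new fuel [] acc = acc.reverse := by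
  intro fuel acc
  cases fuel <;> simp [PySem.Chars.replace.go]

theorem go_rep1 : ∀ (fuel : Nat) (l acc : List Char), l.length ≤ fuel →
    PySem.Chars.replace.go ['_','_'] ['_'] fuel l acc = acc.reverse ++ rep1 l := by
  intro fuel
  induction fuel with
  | zero =>
    intro l acc h
    have : l = [] := by cases l <;> simp_all
    subst this
    simp [PySem.Chars.replace.go, rep1]
  | succ n ih =>
    intro l acc h
    match l with
    | [] => simp [PySem.Chars.replace.go, rep1]
    | [c] =>
      simp only [PySem.Chars.replace.go, List.isPrefixOf, rep1]
      simp [go_nil, rep1]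
    | a :: b :: t =>
      by_cases hab : a = '_' ∧ b = '_'
      · obtain ⟨rfl, rfl⟩ := hab
        rw [PySem.Chars.replace.go]
        simp only [List.isPrefixOf, beq_self_eq_true, Bool.and_self, Bool.true_and, if_true, List.length_cons, List.drop_succ_cons, List.drop_zero, List.length_nil, List.drop]
        rw [ih t _ (by simp at h; omega)]
        simp [rep1]
      · rw [PySem.Chars.replace.go]
        have hpre : (['_','_'].isPrefixOf (a :: b :: t)) = false := by
          simp [List.isPrefixOf]
          intro ha hb
          exact hab ⟨ha.symm, hb.symm⟩
        rw [hpre]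
        simp only [if_false, Bool.false_eq_true]
        rw [ih (b :: t) _ (by simpa using h)]
        simp [rep1, hab]

theorem replace_pair (l : List Char) : PySem.Chars.replace l ['_', '_'] ['_'] = rep1 l := by
  unfold PySem.Chars.replace
  simpa using go_rep1 l.length l [] le_rfl

theorem rep1_length_le (l : List Char) : (rep1 l).length ≤ l.length := by
  induction l using rep1.induct with
  | case1 => simp [rep1]
  | case2 c => simp [rep1]
  | case3 a b t h ih => simp [rep1, h]; omega
  | case4 a b t h ih => simp [rep1, h] at ih ⊢; omega

theorem rep1_length_lt (l : List Char) (h : ['_', '_'] <:+: l) : (rep1 l).length < l.length := by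
  induction l using rep1.induct with
  | case1 => simp at h
  | case2 c =>
    have := h.length_le
    simp at this
  | case3 a b t hab ih =>
    obtain ⟨rfl, rfl⟩ := hab
    have := rep1_length_le t
    simp [rep1]
    omega
  | case4 a b t hab ih =>
    simp [rep1, hab]
    rcases List.infix_cons_iff.mp h with hp | hi
    · rcases List.cons_prefix_cons.mp hp with ⟨h1, h2⟩
      rcases List.cons_prefix_cons.mp h2 with ⟨h3, _⟩
      exact absurd ⟨h1.symm, h3.symm⟩ hab
    · have h2 := ih hi
      simp at h2
      omega

theorem collapse_step_lt (s : String) (h : PySem.Str.isIn "__" s = true) :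
    (PySem.Str.replace s "__" "_").toList.length < s.toList.length := by
  have hi : ("__" : String).toList <:+: s.toList := (PySem.Str.isIn_iff_infix _ _).mp h
  rw [PySem.Str.toList_replace]
  have : ("__" : String).toList = ['_', '_'] := by decide
  rw [this] at hi
  rw [show ("__" : String).toList = ['_','_'] from by decide,
      show ("_" : String).toList = ['_'] from by decide]
  rw [replace_pair]
  exact rep1_length_lt _ hi

def badObjChars : List Char :=
  [' ', '!', '"', '#', '$', '%', '&', '\'', '(', ')', '*', '+', ',', '-', '.', '/',
   ':', ';', '<', '=', '>', '?', '@', '[', '\\', ']', '^', '`', '{', '|', '}', '~']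

def collapseUnder (s : String) : String :=
  if PySem.Str.isIn "__" s = true then collapseUnder (PySem.Str.replace s "__" "_") else s
termination_by s.toList.length
decreasing_by exact collapse_step_lt s (by assumption)

def clean_object (rawobjname : String) : String :=
  if PySem.Str.lower rawobjname ∈ (["null", "none", ""] : List String) then "Null"
  else
    let o1 := PySem.Str.strip rawobjname
    let o2 := PySem.Str.replace o1 "+" "p"
    let o3 := PySem.Str.replace o2 "-" "m"
    let o4 := badObjChars.foldl (fun acc bad => PySem.Str.replace acc (String.ofList [bad]) "_") o3
    let o5 := PySem.Str.upper o4
    let o6 := collapseUnder o5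
    PySem.Str.stripChars o6 "_"

-- ===== PORT B =====
def punctuationChars : List Char :=
  ['!', '"', '#', '$', '%', '&', '\'', '(', ')', '*', '+', ',', '-', '.', '/',
   ':', ';', '<', '=', '>', '?', '@', '[', '\\', ']', '^', '_', '`', '{', '|', '}', '~']

def clean_object_alt (rawobjname : String) : String :=
  if PySem.Str.lower rawobjname ∈ (["null", "none", ""] : List String) then "Null"
  else
    let out := (PySem.Str.strip rawobjname).toList.foldl
      (fun out ch =>
        let ch := if ch = '+' then 'p'
                  else if ch = '-' then 'm'
                  else if ch = ' ' ∨ (ch ∈ punctuationChars ∧ ch ≠ '_') then '_'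
                  else ch
        if ch = '_' ∧ (out = [] ∨ out.getLast? = some '_') then out else out ++ [ch]) []
    let out := if out ≠ [] ∧ out.getLast? = some '_' then out.dropLast else out
    PySem.Str.upper (String.ofList out)

-- ===== PRECONDITION & SPEC =====
def Spec_clean_object (rawobjname : String) (out : String) : Prop := out = clean_object_alt rawobjname
instance (rawobjname : String) (out : String) : Decidable (Spec_clean_object rawobjname out) := by unfold Spec_clean_object; infer_instance

-- ===== CLAIM (what is proved, stated in full; the proofs are below) =====
def Claim_equal_clean_object : Prop := ∀ (rawobjname : String), Dom_clean_object rawobjname → Spec_clean_object rawobjname (clean_object rawobjname)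

-- ===== LEMMAS AND PROOFS =====

theorem go_single : ∀ (fuel : Nat) (l acc : List Char) (c d : Char), l.length ≤ fuel →
    PySem.Chars.replace.go [c] [d] fuel l acc
      = acc.reverse ++ l.map (fun x => if x = c then d else x) := by
  intro fuel
  induction fuel with
  | zero =>
    intro l acc c d h
    have : l = [] := by cases l <;> simp_all
    subst this
    simp [PySem.Chars.replace.go]
  | succ n ih =>
    intro l acc c d h
    match l with
    | [] => simp [PySem.Chars.replace.go]
    | a :: t =>
      by_cases hac : a = c
      · subst hac
        rw [PySem.Chars.replace.go]
        simp only [List.isPrefixOf, beq_self_eq_true, Bool.and_self, Bool.true_and, if_true,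
          List.length_cons, List.drop_succ_cons, List.drop, List.isPrefixOf_nil_left,
          List.length_nil, List.drop_zero]
        rw [ih t _ _ d (by simp at h; omega)]
        simp
      · rw [PySem.Chars.replace.go]
        have hpre : ([c].isPrefixOf (a :: t)) = false := by
          simp [List.isPrefixOf]
          exact fun hh => absurd hh.symm hac
        rw [hpre]
        simp only [if_false, Bool.false_eq_true]
        rw [ih t _ c d (by simp at h; omega)]
        simp [hac]

theorem replace_single (l : List Char) (c d : Char) :
    PySem.Chars.replace l [c] [d] = l.map (fun x => if x = c then d else x) := by
  unfold PySem.Chars.replace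
  simpa using go_single l.length l [] c d le_rfl

-- proof-side canonical forms
def rest (prev : Char) : List Char → List Char
  | [] => []
  | c :: t => if prev = '_' ∧ c = '_' then rest prev t else c :: rest c t

def sqz : List Char → List Char
  | [] => []
  | c :: t => c :: rest c t

def popTail (l : List Char) : List Char :=
  if l.getLast? = some '_' then l.dropLast else l

theorem sq_eq_rest (prev : Char) (l : List Char) (h : prev ≠ '_') : rest prev l = sqz l := by
  cases l with
  | nil => rfl
  | cons c t => simp [rest, sqz, h]

-- A-side: rep1 preserves rest-'_' and sqz (strong induction on length)
theorem rep1_pq : ∀ (n : Nat) (l : List Char), l.length ≤ n →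
    sqz (rep1 l) = sqz l ∧ rest '_' (rep1 l) = rest '_' l := by
  intro n
  induction n with
  | zero =>
    intro l h
    have : l = [] := by cases l <;> simp_all
    subst this; exact ⟨rfl, rfl⟩
  | succ n ih =>
    intro l h
    match l with
    | [] => exact ⟨rfl, rfl⟩
    | [c] => exact ⟨rfl, rfl⟩
    | a :: b :: w =>
      simp only [List.length_cons] at h
      by_cases hab : a = '_' ∧ b = '_'
      · obtain ⟨rfl, rfl⟩ := hab
        have hw := ih w (by omega)
        rw [show rep1 ('_' :: '_' :: w) = '_' :: rep1 w from by simp [rep1]]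
        constructor
        · show '_' :: rest '_' (rep1 w) = '_' :: rest '_' ('_' :: w)
          rw [hw.2, show rest '_' ('_' :: w) = rest '_' w from by simp [rest]]
        · show rest '_' ('_' :: rep1 w) = rest '_' ('_' :: '_' :: w)
          rw [show rest '_' ('_' :: rep1 w) = rest '_' (rep1 w) from by simp [rest],
              show rest '_' ('_' :: '_' :: w) = rest '_' w from by simp [rest], hw.2]
      · have hbw := ih (b :: w) (by simp; omega)
        rw [show rep1 (a :: b :: w) = a :: rep1 (b :: w) from by simp [rep1, hab]]
        by_cases ha : a = '_'
        · subst ha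
          have hb : b ≠ '_' := fun hb => hab ⟨rfl, hb⟩
          constructor
          · show '_' :: rest '_' (rep1 (b :: w)) = '_' :: rest '_' (b :: w)
            rw [hbw.2]
          · show rest '_' ('_' :: rep1 (b :: w)) = rest '_' ('_' :: b :: w)
            rw [show rest '_' ('_' :: rep1 (b :: w)) = rest '_' (rep1 (b :: w)) from by simp [rest],
                show rest '_' ('_' :: b :: w) = rest '_' (b :: w) from by simp [rest, hb], hbw.2]
        · constructor
          · show a :: rest a (rep1 (b :: w)) = a :: rest a (b :: w)
            rw [sq_eq_rest a _ ha, sq_eq_rest a _ ha, hbw.1]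
          · show rest '_' (a :: rep1 (b :: w)) = rest '_' (a :: b :: w)
            rw [show rest '_' (a :: rep1 (b :: w)) = a :: rest a (rep1 (b :: w)) from by simp [rest, ha],
                show rest '_' (a :: b :: w) = a :: rest a (b :: w) from by simp [rest, ha],
                sq_eq_rest a _ ha, sq_eq_rest a _ ha, hbw.1]

theorem sqz_rep1 (l : List Char) : sqz (rep1 l) = sqz l := (rep1_pq l.length l le_rfl).1

theorem rest_cons_pair (t : List Char) : rest '_' ('_' :: t) = rest '_' t := by simp [rest]

theorem noadj_sqz (l : List Char) (h : ¬ ['_', '_'] <:+: l) : sqz l = l := by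
  suffices haux : ∀ (t : List Char) (c : Char), ¬ ['_', '_'] <:+: (c :: t) → rest c t = t by
    cases l with
    | nil => rfl
    | cons c t => simpa [sqz] using haux t c h
  intro t
  induction t with
  | nil => intro c _; rfl
  | cons d v ih =>
    intro c hc
    have hcd : ¬ (c = '_' ∧ d = '_') := by
      rintro ⟨rfl, rfl⟩
      exact hc (List.infix_cons_iff.mpr (Or.inl (List.cons_prefix_cons.mpr ⟨rfl, List.cons_prefix_cons.mpr ⟨rfl, List.nil_prefix⟩⟩)))
    have hdv : ¬ ['_', '_'] <:+: (d :: v) := fun hh => hc ((List.infix_cons_iff.mpr (Or.inr hh)))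
    simp [rest, hcd, ih d hdv]

theorem collapse_toList (s : String) : (collapseUnder s).toList = sqz s.toList := by
  generalize hn : s.toList.length = n
  induction n using Nat.strong_induction_on generalizing s with
  | _ n ih =>
    rw [collapseUnder]
    by_cases h : PySem.Str.isIn "__" s = true
    · rw [if_pos h]
      have hlt := collapse_step_lt s h
      rw [ih _ (by omega : (PySem.Str.replace s "__" "_").toList.length < n) _ rfl]
      rw [PySem.Str.toList_replace,
          show ("__" : String).toList = ['_','_'] from by decide,
          show ("_" : String).toList = ['_'] from by decide,
          replace_pair, sqz_rep1]
    · rw [if_neg h]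
      have hni : ¬ (['_','_'] <:+: s.toList) := by
        intro hi
        exact h ((PySem.Str.isIn_iff_infix _ _).mpr (by rwa [show ("__" : String).toList = ['_','_'] from by decide]))
      exact (noadj_sqz _ hni).symm

-- no adjacent underscores in prev :: rest prev t
theorem noadj_rest : ∀ (t : List Char) (prev : Char), ¬ ['_', '_'] <:+: (prev :: rest prev t) := by
  intro t
  induction t with
  | nil =>
    intro prev h
    have := h.length_le
    simp [rest] at this
  | cons c v ih =>
    intro prev h
    by_cases hpc : prev = '_' ∧ c = '_'
    · obtain ⟨rfl, rfl⟩ := hpc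
      rw [rest] at h
      simp only [and_self, if_true] at h
      exact ih '_' h
    · rw [rest, if_neg hpc] at h
      rcases List.infix_cons_iff.mp h with hp | hi
      · rcases List.cons_prefix_cons.mp hp with ⟨h1, h2⟩
        rcases List.cons_prefix_cons.mp h2 with ⟨h3, _⟩
        exact hpc ⟨h1.symm, h3.symm⟩
      · exact ih c hi

theorem noadj_rest_us (t : List Char) : ¬ ['_', '_'] <:+: rest '_' t :=
  fun h => noadj_rest t '_' (h.trans ⟨['_'], [], by simp⟩)

-- dropWhile underscores
theorem dropWhile_rest_us (t : List Char) (p : Char → Bool) (hp : ∀ c, p c = true ↔ c = '_') :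
    List.dropWhile p (rest '_' t) = rest '_' t := by
  induction t with
  | nil => rfl
  | cons c v ih =>
    by_cases hc : c = '_'
    · subst hc; rw [rest_cons_pair]; exact ih
    · rw [show rest '_' (c :: v) = c :: rest c v from by simp [rest, hc]]
      rw [List.dropWhile_cons_of_neg (by simp [hp, hc])]

theorem dropWhile_sqz (l : List Char) (p : Char → Bool) (hp : ∀ c, p c = true ↔ c = '_') :
    List.dropWhile p (sqz l) = rest '_' l := by
  cases l with
  | nil => rfl
  | cons c t =>
    by_cases hc : c = '_'
    · subst hc
      rw [show sqz ('_' :: t) = '_' :: rest '_' t from rfl,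
          List.dropWhile_cons_of_pos (by simp [hp]), dropWhile_rest_us t p hp, rest_cons_pair]
    · rw [show sqz (c :: t) = c :: rest c t from rfl,
          List.dropWhile_cons_of_neg (by simp [hp, hc]),
          show rest '_' (c :: t) = c :: rest c t from by simp [rest, hc]]

-- rstrip of a no-adjacent list is popTail
theorem rstrip_noadj (x : List Char) (p : Char → Bool) (hp : ∀ c, p c = true ↔ c = '_')
    (h : ¬ ['_', '_'] <:+: x) :
    (List.dropWhile p x.reverse).reverse = popTail x := by
  rcases hx : x.reverse with _ | ⟨c, t⟩
  · have : x = [] := by simpa using congrArg List.reverse hx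
    subst this; simp [popTail]
  · have hxx : x = t.reverse ++ [c] := by
      have := congrArg List.reverse hx
      simpa using this
    subst hxx
    by_cases hc : c = '_'
    · subst hc
      rw [List.dropWhile_cons_of_pos (by simp [hp])]
      have ht : List.dropWhile p t = t := by
        cases t with
        | nil => rfl
        | cons d u =>
          by_cases hd : d = '_'
          · subst hd
            exfalso
            apply h
            exact ⟨u.reverse, [], by simp⟩
          · rw [List.dropWhile_cons_of_neg (by simp [hp, hd])]
      rw [ht, popTail, List.getLast?_concat, if_pos rfl, List.dropLast_concat]
    · rw [List.dropWhile_cons_of_neg (by simp [hp, hc])]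
      rw [popTail, List.getLast?_concat, if_neg (by simpa using hc), ← hx, List.reverse_reverse]

-- B-side loop characterization
def fmapB (c : Char) : Char :=
  if c = '+' then 'p' else if c = '-' then 'm'
  else if c = ' ' ∨ (c ∈ punctuationChars ∧ c ≠ '_') then '_' else c

def step2 (out : List Char) (c : Char) : List Char :=
  if c = '_' ∧ (out = [] ∨ out.getLast? = some '_') then out else out ++ [c]

theorem foldl_step2_append : ∀ (l out : List Char) (c : Char),
    List.foldl step2 (out ++ [c]) l = out ++ c :: rest c l := by
  intro l
  induction l with
  | nil => intro out c; simp [rest]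
  | cons d t ih =>
    intro out c
    rw [List.foldl_cons]
    by_cases hdc : d = '_' ∧ c = '_'
    · obtain ⟨rfl, rfl⟩ := hdc
      rw [show step2 (out ++ ['_']) '_' = out ++ ['_'] from by simp [step2]]
      rw [ih out '_', show rest '_' ('_' :: t) = rest '_' t from by simp [rest]]
    · have hs : step2 (out ++ [c]) d = (out ++ [c]) ++ [d] := by
        rw [step2, if_neg]
        rintro ⟨rfl, h2⟩
        rcases h2 with h2 | h2
        · simp at h2
        · rw [List.getLast?_concat] at h2
          exact hdc ⟨rfl, by simpa using h2⟩
      rw [hs, ih (out ++ [c]) d,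
          show rest c (d :: t) = d :: rest d t from by simp only [rest]; rw [if_neg (fun hh => hdc ⟨hh.2, hh.1⟩)],
          List.append_assoc]
      rfl
  
theorem foldl_step2_nil (l : List Char) : List.foldl step2 [] l = rest '_' l := by
  induction l with
  | nil => rfl
  | cons c t ih =>
    rw [List.foldl_cons]
    by_cases hc : c = '_'
    · subst hc
      rw [show step2 [] '_' = [] from by simp [step2], ih, rest_cons_pair]
    · rw [show step2 [] c = [] ++ [c] from by simp [step2, hc], foldl_step2_append,
          show rest '_' (c :: t) = c :: rest c t from by simp [rest, hc]]
      rfl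

-- A-side fold of replaces
theorem fold_toList : ∀ (bs : List Char) (s : String),
    (bs.foldl (fun acc b => PySem.Str.replace acc (String.ofList [b]) "_") s).toList
      = bs.foldl (fun acc b => PySem.Chars.replace acc [b] ['_']) s.toList := by
  intro bs
  induction bs with
  | nil => intro s; rfl
  | cons b t ih =>
    intro s
    rw [List.foldl_cons, List.foldl_cons, ih, PySem.Str.toList_replace]
    simp [show ("_" : String).toList = ['_'] from by decide]

theorem foldl_replace_map : ∀ (bs : List Char) (t : List Char),
    bs.foldl (fun acc b => PySem.Chars.replace acc [b] ['_']) t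
      = t.map (fun x => bs.foldl (fun y b => if y = b then '_' else y) x) := by
  intro bs
  induction bs with
  | nil => intro t; simp
  | cons b bs' ih =>
    intro t
    rw [List.foldl_cons, ih, replace_single, List.map_map]
    simp [Function.comp]

theorem foldl_mark_fix (bs : List Char) (h : '_' ∉ bs) :
    bs.foldl (fun y b => if y = b then '_' else y) '_' = '_' := by
  induction bs with
  | nil => rfl
  | cons b t ih =>
    rw [List.foldl_cons, if_neg (fun hh : '_' = b => h (hh ▸ List.mem_cons_self))]
    exact ih (fun hm => h (List.mem_cons_of_mem _ hm))

theorem foldl_mark (bs : List Char) (x : Char) (h : '_' ∉ bs) :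
    bs.foldl (fun y b => if y = b then '_' else y) x = if x ∈ bs then '_' else x := by
  induction bs with
  | nil => simp
  | cons b t ih =>
    rw [List.foldl_cons]
    by_cases hx : x = b
    · subst hx
      rw [if_pos rfl, if_pos List.mem_cons_self]
      exact foldl_mark_fix t (fun hm => h (List.mem_cons_of_mem _ hm))
    · rw [if_neg hx, ih (fun hm => h (List.mem_cons_of_mem _ hm))]
      by_cases hxt : x ∈ t
      · rw [if_pos hxt, if_pos (List.mem_cons_of_mem _ hxt)]
      · rw [if_neg hxt, if_neg (by simp [hx, hxt])]

-- upperChar facts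
theorem upperChar_us_iff (c : Char) : PySem.Chars.upperChar c = '_' ↔ c = '_' := by
  constructor
  · intro h
    unfold PySem.Chars.upperChar PySem.Chars.islower at h
    split at h
    · rename_i hl
      simp only [Bool.and_eq_true, decide_eq_true_eq, Char.le_def] at hl
      have hb : 97 ≤ c.toNat ∧ c.toNat ≤ 122 := by constructor <;> [exact hl.1; exact hl.2]
      have hv : (c.toNat - 32).isValidChar := Or.inl (by omega)
      have h2 : (Char.ofNat (c.toNat - 32)).toNat = 95 := by rw [h]; rfl
      rw [Char.toNat_ofNat, if_pos hv] at h2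
      omega
    · exact h
  · rintro rfl; decide

theorem map_upper_rest : ∀ (l : List Char) (prev : Char),
    List.map PySem.Chars.upperChar (rest prev l)
      = rest (PySem.Chars.upperChar prev) (List.map PySem.Chars.upperChar l) := by
  intro l
  induction l with
  | nil => intro prev; rfl
  | cons c t ih =>
    intro prev
    by_cases hpc : prev = '_' ∧ c = '_'
    · obtain ⟨rfl, rfl⟩ := hpc
      rw [show rest '_' ('_' :: t) = rest '_' t from by simp [rest], ih]
      simp [rest, upperChar_us_iff]
    · rw [show rest prev (c :: t) = c :: rest c t from by simp [rest, hpc]]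
      rw [List.map_cons, List.map_cons, ih,
          show rest (PySem.Chars.upperChar prev) (PySem.Chars.upperChar c :: List.map PySem.Chars.upperChar t)
            = PySem.Chars.upperChar c :: rest (PySem.Chars.upperChar c) (List.map PySem.Chars.upperChar t) from by
          simp only [rest, upperChar_us_iff]
          rw [if_neg hpc]]

theorem map_upper_popTail (x : List Char) :
    List.map PySem.Chars.upperChar (popTail x) = popTail (List.map PySem.Chars.upperChar x) := by
  unfold popTail
  rw [List.getLast?_map]
  cases hx : x.getLast? with
  | none => simp
  | some c =>
    by_cases hc : c = '_'
    · subst hc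
      rw [if_pos rfl, Option.map_some, if_pos (by simp [upperChar_us_iff]), List.map_dropLast]
    · rw [if_neg (by simpa using hc), Option.map_some,
          if_neg (by simp [upperChar_us_iff]; simpa using hc)]

theorem popTail_if (l : List Char) :
    (if l ≠ [] ∧ l.getLast? = some '_' then l.dropLast else l) = popTail l := by
  cases l with
  | nil => simp [popTail]
  | cons c t =>
    unfold popTail
    simp

-- pointwise mapping equality
theorem mem_bad_iff (c : Char) (h1 : c ≠ '+') (h2 : c ≠ '-') :
    c ∈ badObjChars ↔ (c = ' ' ∨ (c ∈ punctuationChars ∧ c ≠ '_')) := by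
  constructor
  · intro h
    simp only [badObjChars] at h
    fin_cases h <;>
      first
        | exact Or.inl rfl
        | exact absurd rfl h1
        | exact absurd rfl h2
        | exact Or.inr ⟨by decide, by decide⟩
  · rintro (rfl | ⟨h, hne⟩)
    · decide
    · simp only [punctuationChars] at h
      fin_cases h <;>
        first
          | decide
          | exact absurd rfl hne
          | exact absurd rfl h1
          | exact absurd rfl h2

theorem ptwise (c : Char) :
    PySem.Chars.upperChar
      (if ((if (if c = '+' then 'p' else c) = '-' then 'm' else if c = '+' then 'p' else c) ∈ badObjChars)
        then '_'
        else (if (if c = '+' then 'p' else c) = '-' then 'm' else if c = '+' then 'p' else c))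
      = PySem.Chars.upperChar (fmapB c) := by
  by_cases h1 : c = '+'
  · subst h1; decide
  by_cases h2 : c = '-'
  · subst h2; decide
  simp only [if_neg h1, if_neg h2, fmapB]
  by_cases hb : c ∈ badObjChars
  · rw [if_pos hb, if_pos ((mem_bad_iff c h1 h2).mp hb)]
  · rw [if_neg hb, if_neg (fun hc => hb ((mem_bad_iff c h1 h2).mpr hc))]

theorem contains_us_iff (c : Char) : (['_'].contains c) = true ↔ c = '_' := by simp

theorem lam_eq : (fun (out : List Char) (ch : Char) =>
        let ch := if ch = '+' then 'p'
                  else if ch = '-' then 'm'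
                  else if ch = ' ' ∨ (ch ∈ punctuationChars ∧ ch ≠ '_') then '_'
                  else ch
        if ch = '_' ∧ (out = [] ∨ out.getLast? = some '_') then out else out ++ [ch])
      = fun out ch => step2 out (fmapB ch) := by
  funext out ch
  simp only [step2, fmapB]

set_option maxRecDepth 4000 in
theorem ports_agree (s : String) : clean_object s = clean_object_alt s := by
  unfold clean_object clean_object_alt
  by_cases hg : PySem.Str.lower s ∈ (["null", "none", ""] : List String)
  · rw [if_pos hg, if_pos hg]
  · rw [if_neg hg, if_neg hg]
    apply String.toList_inj.mp
    -- left side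
    rw [PySem.Str.toList_stripChars, collapse_toList, PySem.Str.toList_upper,
        fold_toList, foldl_replace_map,
        PySem.Str.toList_replace, PySem.Str.toList_replace,
        show ("+" : String).toList = ['+'] from by decide,
        show ("p" : String).toList = ['p'] from by decide,
        show ("-" : String).toList = ['-'] from by decide,
        show ("m" : String).toList = ['m'] from by decide,
        show ("_" : String).toList = ['_'] from by decide,
        replace_single, replace_single]
    simp only [PySem.Chars.upper, List.map_map, PySem.Chars.stripChars]
    rw [dropWhile_sqz _ _ contains_us_iff, rstrip_noadj _ _ contains_us_iff (noadj_rest_us _)]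
    -- right side
    rw [PySem.Str.toList_upper]
    simp only [String.toList_ofList]
    rw [popTail_if]
    rw [lam_eq]
    rw [← List.foldl_map, foldl_step2_nil]
    simp only [PySem.Chars.upper] at *
    rw [map_upper_popTail, map_upper_rest,
        show PySem.Chars.upperChar '_' = '_' from rfl, List.map_map]
    refine congrArg popTail (congrArg (rest '_') (List.map_congr_left fun a _ => ?_))
    simp only [Function.comp]
    rw [foldl_mark _ _ (by decide)]
    exact ptwise a

-- ===== VERDICT (by name: the statement is the Claim_ definition above) =====
theorem clean_object_spec : Claim_equal_clean_object := by
  intro rawobjname _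
  exact ports_agree rawobjname
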